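-- pv_equiv track=rewrite | github.com/pabgarcialopez/Math-thesis | src/analysis/analysis.py | project_history_to_boolean_function
-- ===== SOURCE A (Python) =====
-- def project_history_to_boolean_function(config_history):
--     """
--     Dada la historia de configuraciones (cada una de 10 bits, como string),
--     proyecta la parte de la cinta (los primeros 5 bits) y construye la función
--     booleana de 5 bits (tabla de verdad de 32 bits) definida de la siguiente manera:
--       - Para cada uno de los 2^5 = 32 posibles patrones (ordenados lexicográficamente),
--         se asigna 1 si dicho patrón aparece al menos una vez en la proyección,
--         o 0 en caso contrario.
--
--     Args:
--         config_history (list of str): Lista de configuraciones de 10 bits (cada string).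
--
--     Returns:
--         int: Representación entera de la función booleana de 32 bits.
--     """
--
--     # Obtenemos las configuraciones proyectadas
--     observed = set()
--     for config in config_history:
--         tape_bits = config[:5]
--         observed.add(tape_bits)
--
--     # Construimos la tabla de verdad
--     truth_table = ""
--     for i in range(32):
--         pattern = format(i, '05b')
--         truth_table += "1" if pattern in observed else "0"
--
--     return int(truth_table, 2)
-- ===== SOURCE B (Python) =====
-- def project_history_to_boolean_function(config_history):
--     seen = set()
--     for config in config_history:
--         p = config[:5]
--         if len(p) == 5 and all(c in "01" for c in p):
--             seen.add(int(p, 2))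
--     return sum(1 << (31 - j) for j in seen)
-- ===== Notes on version B (the rewrite author's own statement) =====
-- stated objective: simpler
-- what changed: Replaces A's set of prefix strings plus a fixed 32-iteration truth-table string build and base-2 parse by a single pass over config_history that sets bit 31-int(prefix,2) in an integer accumulator for each well-formed 5-bit binary prefix.
import Mathlib
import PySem

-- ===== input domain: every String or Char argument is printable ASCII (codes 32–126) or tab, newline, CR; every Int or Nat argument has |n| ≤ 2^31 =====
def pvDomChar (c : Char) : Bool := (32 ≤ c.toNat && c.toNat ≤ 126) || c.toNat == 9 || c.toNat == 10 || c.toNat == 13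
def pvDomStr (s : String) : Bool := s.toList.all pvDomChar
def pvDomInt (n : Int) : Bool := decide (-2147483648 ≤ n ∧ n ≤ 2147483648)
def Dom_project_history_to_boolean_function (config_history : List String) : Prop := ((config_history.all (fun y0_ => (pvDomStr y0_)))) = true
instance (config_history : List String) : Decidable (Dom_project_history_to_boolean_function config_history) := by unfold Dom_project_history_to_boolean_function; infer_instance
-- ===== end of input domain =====

-- B replaces A's prefix-string set + 32-iteration truth-table string build by one pass that
-- sets bit (31 - int(prefix,2)) in an integer accumulator for each 5-bit binary prefix (simpler).


-- ===== PORT A =====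
-- config[:5], kept at the List Char level (PySem.Chars is the string model)
def pvPrefix5 (config : String) : List Char := PySem.Chars.slice config.toList none (some 5)

-- format(i, '05b'): binary digits left-padded with '0' to width 5; exact for 0 ≤ i
-- (A only applies it to i in range(32))
def pvFmt5 (i : Int) : List Char :=
  let b := PySem.Int.toBinChars i
  List.replicate (5 - b.length) '0' ++ b

-- int(s, 2): exact on nonempty strings of '0'/'1' digits, which A's truth_table
-- (exactly 32 such characters) always is
def pvParse2 (cs : List Char) : Int :=
  cs.foldl (fun a c => 2 * a + (if c = '1' then 1 else 0)) 0

def project_history_to_boolean_function (config_history : List String) : Int :=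
  let observed : PySem.Set (List Char) :=
    config_history.foldl (fun s config => PySem.Set.add s (pvPrefix5 config)) PySem.Set.empty
  let truth_table : List Char :=
    (PySem.List.pyRange 0 32 1).foldl
      (fun t i => t ++ (if PySem.Set.contains observed (pvFmt5 i) then ['1'] else ['0'])) []
  pvParse2 truth_table

-- ===== PORT B =====
-- len(p) == 5 and all(c in "01" for c in p)
def pvValid5 (p : List Char) : Bool := p.length == 5 && p.all (fun c => c == '0' || c == '1')

-- 1 << (31 - j); the Nat shift amount is exact since every j in seen lies in [0, 32)
def pvPow (j : Int) : Int := (1 : Int) <<< (31 - j).toNat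

def project_history_to_boolean_function_alt (config_history : List String) : Int :=
  let seen : PySem.Set Int :=
    config_history.foldl
      (fun s config =>
        let p := pvPrefix5 config
        if pvValid5 p then PySem.Set.add s (pvParse2 p) else s)
      PySem.Set.empty
  -- sum(1 << (31 - j) for j in seen): set-iteration order is irrelevant to a sum
  seen.foldl (fun a j => a + pvPow j) 0

-- ===== PRECONDITION & SPEC =====
def Spec_project_history_to_boolean_function (config_history : List String) (out : Int) : Prop := out = project_history_to_boolean_function_alt config_history
instance (config_history : List String) (out : Int) : Decidable (Spec_project_history_to_boolean_function config_history out) := by unfold Spec_project_history_to_boolean_function; infer_instance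

-- ===== CLAIM (what is proved, stated in full; the proofs are below) =====
def Claim_equal_project_history_to_boolean_function : Prop := ∀ (config_history : List String), Dom_project_history_to_boolean_function config_history → Spec_project_history_to_boolean_function config_history (project_history_to_boolean_function config_history)

-- ===== LEMMAS AND PROOFS =====

lemma pvPow_eq (j : Int) : pvPow j = 2 ^ (31 - j).toNat := by
  rw [pvPow, Int.shiftLeft_eq, one_mul]

-- the sets A and B build, named for the proofs
def pvObserved (ch : List String) : PySem.Set (List Char) :=
  ch.foldl (fun s config => PySem.Set.add s (pvPrefix5 config)) PySem.Set.empty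

lemma pvObserved_eq_ofList (ch : List String) :
    pvObserved ch = PySem.Set.ofList (ch.map pvPrefix5) := by
  rw [pvObserved, PySem.Set.ofList_eq_foldl, List.foldl_map]; rfl

def pvSeen (ch : List String) : PySem.Set Int :=
  ch.foldl
    (fun s config =>
      let p := pvPrefix5 config
      if pvValid5 p then PySem.Set.add s (pvParse2 p) else s)
    PySem.Set.empty

lemma pvMem_seen_aux (ch : List String) (s : PySem.Set Int) (i : Int) :
    i ∈ ch.foldl (fun s config =>
      let p := pvPrefix5 config
      if pvValid5 p then PySem.Set.add s (pvParse2 p) else s) s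
    ↔ i ∈ s ∨ ∃ c ∈ ch, pvValid5 (pvPrefix5 c) = true ∧ pvParse2 (pvPrefix5 c) = i := by
  induction ch generalizing s with
  | nil => simp
  | cons c ch ih =>
    simp only [List.foldl_cons, ih]
    by_cases h : pvValid5 (pvPrefix5 c) = true
    · simp [h, PySem.Set.mem_add]; tauto
    · simp [h]

lemma pvMem_seen (ch : List String) (i : Int) :
    i ∈ pvSeen ch ↔ ∃ c ∈ ch, pvValid5 (pvPrefix5 c) = true ∧ pvParse2 (pvPrefix5 c) = i := by
  rw [pvSeen, pvMem_seen_aux]; simp [PySem.Set.empty]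

lemma pvSeen_nodup_aux (ch : List String) (s : PySem.Set Int) (hs : s.Nodup) :
    (ch.foldl (fun s config =>
      let p := pvPrefix5 config
      if pvValid5 p then PySem.Set.add s (pvParse2 p) else s) s).Nodup := by
  induction ch generalizing s with
  | nil => exact hs
  | cons c ch ih =>
    simp only [List.foldl_cons]
    split
    · exact ih _ (PySem.Set.nodup_add _ _ hs)
    · exact ih _ hs

lemma pvSeen_nodup (ch : List String) : (pvSeen ch).Nodup :=
  pvSeen_nodup_aux ch _ (by simp [PySem.Set.empty])


lemma pvParse2_step_bounds : ∀ (cs : List Char) (a : Int), 0 ≤ a →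
    0 ≤ cs.foldl (fun a c => 2 * a + (if c = '1' then 1 else 0)) a ∧
    cs.foldl (fun a c => 2 * a + (if c = '1' then 1 else 0)) a < (a + 1) * 2 ^ cs.length := by
  intro cs
  induction cs with
  | nil => intro a ha; simp only [List.foldl_nil, List.length_nil, pow_zero]; omega
  | cons c cs ih =>
    intro a ha
    simp only [List.foldl_cons, List.length_cons]
    have hb : (0:Int) ≤ (if c = '1' then 1 else 0) ∧ (if c = '1' then (1:Int) else 0) ≤ 1 := by
      split <;> omega
    have h1 : 0 ≤ 2 * a + (if c = '1' then (1:Int) else 0) := by omega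
    obtain ⟨l, r⟩ := ih _ h1
    refine ⟨l, lt_of_lt_of_le r ?_⟩
    have : (2 * a + (if c = '1' then (1:Int) else 0) + 1) ≤ (a + 1) * 2 := by omega
    calc (2 * a + (if c = '1' then (1:Int) else 0) + 1) * 2 ^ cs.length
        ≤ (a + 1) * 2 * 2 ^ cs.length := by
          apply mul_le_mul_of_nonneg_right this (by positivity)
      _ = (a + 1) * 2 ^ (cs.length + 1) := by ring

lemma pvParse2_bounds (p : List Char) (h : pvValid5 p = true) :
    0 ≤ pvParse2 p ∧ pvParse2 p < 32 := by
  have h5 : p.length = 5 := by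
    simp [pvValid5] at h; omega
  have := pvParse2_step_bounds p 0 le_rfl
  rw [h5] at this
  unfold pvParse2
  exact ⟨this.1, by have := this.2; norm_num at this ⊢; omega⟩

lemma pvFmt5_parse2 (p : List Char) (h : pvValid5 p = true) : pvFmt5 (pvParse2 p) = p := by
  rcases p with _|⟨a,_|⟨b,_|⟨c,_|⟨d,_|⟨e,_|⟨f,t⟩⟩⟩⟩⟩⟩ <;> simp [pvValid5] at h
  obtain ⟨⟨ha, hb, hc, hd, he⟩, -⟩ := And.intro h True.intro
  rcases ha with rfl|rfl <;> rcases hb with rfl|rfl <;> rcases hc with rfl|rfl <;>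
    rcases hd with rfl|rfl <;> rcases he with rfl|rfl <;> decide

lemma pvParse2_fmt5 : ∀ i ∈ PySem.List.pyRange 0 32 1,
    pvParse2 (pvFmt5 i) = i ∧ pvValid5 (pvFmt5 i) = true := by decide

lemma pvMem_iff (ch : List String) (i : Int) (hi : i ∈ PySem.List.pyRange 0 32 1) :
    PySem.Set.contains (pvObserved ch) (pvFmt5 i) = true ↔ i ∈ pvSeen ch := by
  obtain ⟨hpi, hvi⟩ := pvParse2_fmt5 i hi
  rw [PySem.Set.contains_iff, pvObserved_eq_ofList, PySem.Set.mem_ofList, pvMem_seen]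
  constructor
  · intro h
    obtain ⟨c, hc, hpc⟩ := List.mem_map.mp h
    exact ⟨c, hc, by rw [hpc]; exact hvi, by rw [hpc, hpi]⟩
  · rintro ⟨c, hc, hv, hp⟩
    have : pvPrefix5 c = pvFmt5 i := by
      rw [← hp, pvFmt5_parse2 _ hv]
    exact List.mem_map.mpr ⟨c, hc, this⟩

lemma pvSum_map_subset (f : Int → Int) (ts l : List Int) (hts : ts.Nodup) (hl : l.Nodup)
    (hsub : ∀ a ∈ ts, a ∈ l) :
    (ts.map f).sum = (l.map (fun i => if i ∈ ts then f i else 0)).sum := by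
  have h1 : ∀ (m : List Int), (m.map (fun i => if i ∈ ts then f i else 0)).sum
      = ((m.filter (fun i => decide (i ∈ ts))).map f).sum := by
    intro m
    induction m with
    | nil => simp
    | cons x m ih =>
      by_cases hx : x ∈ ts <;> simp [hx, ih]
  have hperm : (l.filter (fun i => decide (i ∈ ts))).Perm ts := by
    apply (List.perm_ext_iff_of_nodup (hl.filter _) hts).mpr
    intro a
    simp only [List.mem_filter, decide_eq_true_eq]
    exact ⟨fun h => h.2, fun h => ⟨hsub a h, h⟩⟩
  rw [h1 l, (hperm.map f).sum_eq]

lemma pvParse2_append_bit (t : List Char) (P : Bool) :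
    pvParse2 (t ++ (if P then ['1'] else ['0'])) = 2 * pvParse2 t + (if P then 1 else 0) := by
  unfold pvParse2
  cases P <;> simp [List.foldl_append]

lemma pvParse2_foldl_append (P : Int → Bool) : ∀ (l : List Int) (t : List Char),
    pvParse2 (l.foldl (fun t i => t ++ (if P i then ['1'] else ['0'])) t)
      = l.foldl (fun a i => 2 * a + (if P i then 1 else 0)) (pvParse2 t) := by
  intro l
  induction l with
  | nil => intro t; rfl
  | cons x l ih =>
    intro t
    simp only [List.foldl_cons, ih, pvParse2_append_bit]

lemma pvFinal (b : Int → Int) :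
    (PySem.List.pyRange 0 32 1).foldl (fun a i => 2 * a + b i) 0
      = ((PySem.List.pyRange 0 32 1).map (fun i => b i * 2 ^ (31 - i).toNat)).sum := by
  have h : PySem.List.pyRange 0 32 1
      = [0,1,2,3,4,5,6,7,8,9,10,11,12,13,14,15,16,17,18,19,20,21,22,23,24,25,26,27,28,29,30,31] := by
    decide
  rw [h]
  simp only [List.foldl_cons, List.foldl_nil, List.map_cons, List.map_nil, List.sum_cons,
    List.sum_nil, Int.reduceSub, Int.reduceToNat]
  ring


theorem main_eq (ch : List String) :
    project_history_to_boolean_function ch = project_history_to_boolean_function_alt ch := by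
  have hA : project_history_to_boolean_function ch
      = (PySem.List.pyRange 0 32 1).foldl
          (fun a i => 2 * a + (if PySem.Set.contains (pvObserved ch) (pvFmt5 i) then 1 else 0)) 0 := by
    unfold project_history_to_boolean_function
    exact pvParse2_foldl_append
      (fun i => PySem.Set.contains (pvObserved ch) (pvFmt5 i)) (PySem.List.pyRange 0 32 1) []
  have hB : project_history_to_boolean_function_alt ch
      = ((pvSeen ch).map pvPow).sum := by
    have := PySem.List.foldl_add (pvSeen ch) pvPow 0
    rw [zero_add] at this
    exact this
  have hAB : project_history_to_boolean_function ch
      = (PySem.List.pyRange 0 32 1).foldl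
          (fun a i => 2 * a + (if i ∈ pvSeen ch then 1 else 0)) 0 := by
    rw [hA]
    apply PySem.List.foldl_congr_mem
    intro a i hi
    rw [if_congr (pvMem_iff ch i hi) rfl rfl]
  rw [hAB, hB]
  have hsub : ∀ a ∈ pvSeen ch, a ∈ PySem.List.pyRange 0 32 1 := by
    intro a ha
    obtain ⟨c, _, hv, hp⟩ := (pvMem_seen ch a).mp ha
    have := pvParse2_bounds _ hv
    rw [hp] at this
    rw [PySem.List.mem_pyRange_one]
    omega
  rw [pvSum_map_subset pvPow (pvSeen ch)
    (PySem.List.pyRange 0 32 1) (pvSeen_nodup ch) (PySem.List.nodup_pyRange_one 0 32) hsub]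
  rw [pvFinal (fun i => if i ∈ pvSeen ch then 1 else 0)]
  apply congrArg
  apply List.map_congr_left
  intro i hi
  rw [pvPow_eq]
  split <;> ring

-- ===== VERDICT (by name: the statement is the Claim_ definition above) =====
theorem project_history_to_boolean_function_spec : Claim_equal_project_history_to_boolean_function := by
  intro config_history _
  unfold Spec_project_history_to_boolean_function
  exact main_eq config_history
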